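-- pv_equiv track=rewrite | github.com/jallared/AdventOfCode | 2017/advent17_9.py | removeGarbage
-- ===== SOURCE A (Python) =====
-- def removeGarbage(stream):
-- 	print ('Removing all garbage')
-- 	garbage_counter = 0
-- 	index = 0
-- 	while index < len(stream):
-- 		if stream[index] == '<':
-- 			stream.pop(index)
-- 			while stream[index] != '>':
-- 				stream.pop(index)
-- 				garbage_counter += 1
-- 			if stream[index] == '>':
-- 				stream.pop(index)
-- 		index+=1
-- 	print (garbage_counter)
-- 	return stream
-- ===== SOURCE B (Python) =====
-- # Single forward pass with an in/out-of-garbage flag, building a fresh result list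
-- # (A instead pops elements out of the list it scans).
-- # Does not mutate the argument in place like A does; equivalence is about the return value.
-- def removeGarbage(stream):
-- 	print ('Removing all garbage')
-- 	garbage_counter = 0
-- 	result = []
-- 	in_garbage = False
-- 	for c in stream:
-- 		if in_garbage:
-- 			if c == '>':
-- 				in_garbage = False
-- 			else:
-- 				garbage_counter += 1
-- 		elif c == '<':
-- 			in_garbage = True
-- 		else:
-- 			result.append(c)
-- 	print (garbage_counter)
-- 	return result
-- ===== Notes on version B (the rewrite author's own statement) =====
-- stated objective: alternative
-- what changed: Replaces the index-based scan that repeatedly pops elements out of the list by a single forward pass with an in/out-of-garbage flag that appends kept characters to a fresh result list; B does not mutate the argument and does not skip the character following a closed garbage segment.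
-- intended difference: On streams where a garbage segment is immediately followed by '<' (A's index+=1 after popping '>' skips that character), A keeps that '<' and the garbage it opens, e.g. ['<','>','<','>'] -> ['<','>'], while B removes every garbage segment and returns [], which is the intended garbage-removal behaviour. — e.g. on removeGarbage(["<", ">", "<", ">"]): A returns ["<", ">"], B returns []
-- outside the precondition, e.g. on removeGarbage(['<', '>', '<']): A returns ['<'], B returns []
import Mathlib
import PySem

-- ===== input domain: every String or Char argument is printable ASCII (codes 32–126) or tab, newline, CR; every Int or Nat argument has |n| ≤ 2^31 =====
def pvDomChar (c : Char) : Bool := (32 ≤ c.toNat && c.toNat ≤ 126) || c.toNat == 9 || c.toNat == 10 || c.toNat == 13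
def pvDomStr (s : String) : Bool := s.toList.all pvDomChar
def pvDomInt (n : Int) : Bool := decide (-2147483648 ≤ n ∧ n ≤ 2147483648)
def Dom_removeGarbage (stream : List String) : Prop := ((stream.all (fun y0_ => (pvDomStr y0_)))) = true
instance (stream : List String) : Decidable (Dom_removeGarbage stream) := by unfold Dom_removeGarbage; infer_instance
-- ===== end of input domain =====

-- B replaces A's pop-at-index rescanning by one forward pass with an in/out-of-garbage flag;
-- equivalence is about the RETURN value only: A mutates its argument in place (pop) and prints, B builds a fresh list.

-- ===== PORT A =====
-- A's two while loops, ported as fuel-bounded structural recursion (the fuel arguments are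
-- bounds on the number of iterations — each iteration pops an element or advances the index —
-- and are always sufficient; running out yields `none`, like the IndexError branches)

-- inner `while stream[index] != '>': stream.pop(index); garbage_counter += 1`; Python's
-- IndexError is `none`; the counter is only printed, never returned, so it is not modelled
def innerA : Nat → List String → Nat → Option (List String)
  | 0, _, _ => none
  | fuel + 1, s, i =>
    match PySem.List.pyGet? s (i : Int) with
    | none => none            -- stream[index] raises IndexError (unclosed garbage)
    | some c =>
      if c = ">" then some s
      else
        match PySem.List.pop? s (i : Int) with
        | none => none
        | some (_, s') => innerA fuel s' i

-- outer `while index < len(stream)` loop of A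
def outerA : Nat → List String → Nat → Option (List String)
  | 0, _, _ => none
  | fuel + 1, s, i =>
    if i < s.length then
      match PySem.List.pyGet? s (i : Int) with      -- stream[index]
      | none => none                                -- unreachable: index < len(stream)
      | some c =>
        if c = "<" then
          match PySem.List.pop? s (i : Int) with        -- stream.pop(index)
          | none => none
          | some (_, s1) =>
            match innerA (s1.length + 1) s1 i with      -- inner while loop
            | none => none
            | some s2 =>
              match PySem.List.pyGet? s2 (i : Int) with -- if stream[index] == '>'
              | none => none
              | some c2 =>
                if c2 = ">" then
                  match PySem.List.pop? s2 (i : Int) with  -- stream.pop(index)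
                  | none => none
                  | some (_, s3) => outerA fuel s3 (i + 1) -- index += 1
                else outerA fuel s2 (i + 1)
        else outerA fuel s (i + 1)
    else some s

-- A returns the (mutated) stream; on inputs where Python raises IndexError (outside Pre_) the
-- loop model yields `none` and we return the input unchanged (nothing is claimed there)
def removeGarbage (stream : List String) : List String :=
  match outerA (stream.length + 1) stream 0 with
  | some r => r
  | none => stream

-- ===== PORT B =====
-- one forward pass; the Bool is the in_garbage flag (counter and prints of Source B do not affect the return value)
def altGo : List String → Bool → List String
  | [], _ => []
  | c :: r, true => if c = ">" then altGo r false else altGo r true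
  | c :: r, false => if c = "<" then altGo r true else c :: altGo r false

def removeGarbage_alt (stream : List String) : List String :=
  altGo stream false

-- ===== PRECONDITION & SPEC =====
-- Pre_ excludes streams in which some '<' has no '>' anywhere after it: on those A either raises
-- IndexError (unclosed garbage it scans) or — when the unclosed '<' is exactly the character its
-- `index += 1` skips after a closed segment — returns with that '<' kept; one such returning input
-- is cited in claim.json (['<','>','<'], where A returns ['<'] and B returns []).
def okB : List String → Bool
  | [] => true
  | c :: r => (c != "<" || r.contains ">") && okB r

def Pre_removeGarbage (stream : List String) : Prop := okB stream = true
instance (stream : List String) : Decidable (Pre_removeGarbage stream) := by unfold Pre_removeGarbage; infer_instance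
def pvWitness_removeGarbage : List String := ["a", "<", "b", ">", "c"]

-- On streams where a closed garbage segment is immediately followed by '<', A's `index += 1` after
-- popping '>' skips that '<' and keeps it (and the garbage it opens), e.g. ['<','>','<','>'] -> ['<','>'],
-- while B removes every garbage segment (-> []), which is the intended behaviour.
-- Closed form: some '<' at i is followed by a '>' at j with no '>' strictly between, and a '<' right after j.
def D_removeGarbage (stream : List String) : Prop :=
  ∃ i ∈ List.range stream.length, ∃ j ∈ List.range stream.length,
    i < j ∧ j + 1 < stream.length ∧
    stream.getD i "" = "<" ∧ stream.getD j "" = ">" ∧ stream.getD (j + 1) "" = "<" ∧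
    ∀ k ∈ List.range stream.length, i < k → k < j → stream.getD k "" ≠ ">"
instance (stream : List String) : Decidable (D_removeGarbage stream) := by unfold D_removeGarbage; infer_instance

def Spec_removeGarbage (stream : List String) (out : List String) : Prop := ¬ D_removeGarbage stream → out = removeGarbage_alt stream
instance (stream : List String) (out : List String) : Decidable (Spec_removeGarbage stream out) := by unfold Spec_removeGarbage; infer_instance

def pvDiffWitness_removeGarbage : List String := ["<", ">", "<", ">"]
def pvDiffWitnessOut_removeGarbage : (List String) × (List String) := (["<", ">"], [])

-- ===== CLAIM (what is proved, stated in full; the proofs are below) =====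
def Claim_unchanged_removeGarbage : Prop := ∀ (stream : List String), Dom_removeGarbage stream → Pre_removeGarbage stream → Spec_removeGarbage stream (removeGarbage stream)
def Claim_changed_removeGarbage : Prop := Dom_removeGarbage (pvDiffWitness_removeGarbage) ∧ Pre_removeGarbage (pvDiffWitness_removeGarbage) ∧ D_removeGarbage (pvDiffWitness_removeGarbage) ∧ removeGarbage (pvDiffWitness_removeGarbage) = pvDiffWitnessOut_removeGarbage.1 ∧ removeGarbage_alt (pvDiffWitness_removeGarbage) = pvDiffWitnessOut_removeGarbage.2 ∧ pvDiffWitnessOut_removeGarbage.1 ≠ pvDiffWitnessOut_removeGarbage.2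
def Claim_exact_removeGarbage : Prop := ∀ (stream : List String), Dom_removeGarbage stream → Pre_removeGarbage stream → D_removeGarbage stream → removeGarbage stream ≠ removeGarbage_alt stream

-- ===== LEMMAS AND PROOFS =====

theorem pvPop_at {α : Type} (pre : List α) (x : α) (t : List α) :
    PySem.List.pop? (pre ++ x :: t) (pre.length : Int) = some (x, pre ++ t) := by
  have h : pre.length < (pre ++ x :: t).length := by simp
  rw [PySem.List.pop?_natCast _ _ h]
  have h2 : (pre ++ x :: t).eraseIdx pre.length = pre ++ t := by
    rw [List.eraseIdx_append_of_length_le (le_refl _)]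
    simp
  have h1 : (pre ++ x :: t)[pre.length]'h = x := by
    simp
  rw [h2, h1]

theorem inner_spec (g : List String) : ∀ (fuel : Nat) (pre r : List String), ">" ∉ g →
    g.length < fuel →
    innerA fuel (pre ++ (g ++ ">" :: r)) pre.length = some (pre ++ ">" :: r) := by
  induction g with
  | nil =>
    intro fuel pre r _ hf
    match fuel, hf with
    | f + 1, _ =>
      rw [innerA]
      simp [PySem.List.pyGet?_append_length]
  | cons x g' ih =>
    intro fuel pre r hg hf
    have hx : x ≠ ">" := fun h => hg (by simp [h])
    match fuel, hf with
    | f + 1, hf =>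
      rw [innerA]
      simp only [List.cons_append, PySem.List.pyGet?_append_length]
      rw [if_neg hx]
      simp only [pvPop_at]
      exact ih f pre r (fun h => hg (by simp [h])) (by simp at hf; omega)

-- a finished scan: once the index has passed the end, the loop returns the stream
theorem outerA_done (f : Nat) (s : List String) (i : Nat) (hf : 1 ≤ f) (hi : s.length ≤ i) :
    outerA f s i = some s := by
  match f, hf with
  | f' + 1, _ =>
    rw [outerA]
    rw [if_neg (by omega)]

theorem okB_append (u v : List String) (h : okB (u ++ v) = true) : okB v = true := by
  induction u with
  | nil => exact h
  | cons x u' ih =>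
    simp only [List.cons_append, okB, Bool.and_eq_true] at h
    exact ih h.2

-- proof-side scanner tracking B's in-garbage flag; detects a close immediately followed by '<'
def dB : List String → Bool → Bool
  | [], _ => false
  | c :: r, false => if c = "<" then dB r true else dB r false
  | c :: r, true =>
      if c = ">" then
        match r with
        | [] => false
        | d :: _ => if d = "<" then true else dB r false
      else dB r true

def dBstop : List String → Bool
  | [] => false
  | d :: t' => if d = "<" then true else dB (d :: t') false

theorem dB_garbage (g t : List String) (hg : ">" ∉ g) :
    dB (g ++ ">" :: t) true = dBstop t := by
  induction g with
  | nil =>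
    cases t with
    | nil => simp [dB, dBstop]
    | cons d t' => simp [dB, dBstop]
  | cons x g' ih =>
    have hx : x ≠ ">" := fun h => hg (by simp [h])
    simp only [List.cons_append, dB, hx]
    exact ih (fun h => hg (by simp [h]))

theorem altGo_garbage (g t : List String) (hg : ">" ∉ g) :
    altGo (g ++ ">" :: t) true = altGo t false := by
  induction g with
  | nil => simp [altGo]
  | cons x g' ih =>
    have hx : x ≠ ">" := fun h => hg (by simp [h])
    simp only [List.cons_append, altGo, hx]
    exact ih (fun h => hg (by simp [h]))

-- the head of a dropWhile (· ≠ ">") split is ">"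
theorem pvDrop_head : ∀ (l : List String) (d : String) (t : List String),
    l.dropWhile (fun y => y ≠ ">") = d :: t → d = ">" := by
  intro l
  induction l with
  | nil => intro d t h; simp at h
  | cons x xs ih =>
    intro d t h
    by_cases hx : x = ">"
    · have hpx : ¬ ((fun y : String => decide (y ≠ ">")) x = true) := by simp [hx]
      rw [List.dropWhile_cons, if_neg hpx] at h
      injection h with h1 _
      rw [← h1, hx]
    · have hpx : (fun y : String => decide (y ≠ ">")) x = true := by simp [hx]
      rw [List.dropWhile_cons, if_pos hpx] at h
      exact ih d t h

-- a concrete decomposition witnesses D_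
theorem decomp_D (u v w : List String) (hv : ">" ∉ v) :
    D_removeGarbage (u ++ "<" :: (v ++ ">" :: "<" :: w)) := by
  unfold D_removeGarbage
  refine ⟨u.length, ?_, u.length + 1 + v.length, ?_, by omega, ?_, ?_, ?_, ?_, ?_⟩
  · simp only [List.mem_range, List.length_append, List.length_cons]; omega
  · simp only [List.mem_range, List.length_append, List.length_cons]; omega
  · simp only [List.length_append, List.length_cons]; omega
  · rw [List.getD_eq_getElem?_getD, List.getElem?_append_right (le_refl _)]
    simp
  · rw [List.getD_eq_getElem?_getD, List.getElem?_append_right (by omega : u.length ≤ u.length + 1 + v.length)]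
    have h1 : u.length + 1 + v.length - u.length = v.length + 1 := by omega
    rw [h1]
    simp only [List.getElem?_cons_succ]
    rw [List.getElem?_append_right (le_refl _)]
    simp
  · rw [List.getD_eq_getElem?_getD, List.getElem?_append_right (by omega : u.length ≤ u.length + 1 + v.length + 1)]
    have h1 : u.length + 1 + v.length + 1 - u.length = v.length + 2 := by omega
    rw [h1]
    simp only [List.getElem?_cons_succ]
    rw [List.getElem?_append_right (by omega : v.length ≤ v.length + 1)]
    have h2 : v.length + 1 - v.length = 1 := by omega
    rw [h2]
    simp
  · intro k _ hik hkj
    have hm : k - u.length - 1 < v.length := by omega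
    have hk : u.length ≤ k := by omega
    rw [List.getD_eq_getElem?_getD, List.getElem?_append_right hk]
    have h1 : k - u.length = (k - u.length - 1) + 1 := by omega
    rw [h1]
    simp only [List.getElem?_cons_succ]
    rw [List.getElem?_append_left (by omega)]
    rw [List.getElem?_eq_getElem hm]
    intro hcontra
    exact hv (hcontra ▸ List.getElem_mem hm)

-- a successful scan yields such a decomposition
theorem dB_decomp : ∀ (s : List String) (b : Bool), dB s b = true →
    if b then
      (∃ v w, s = v ++ ">" :: "<" :: w ∧ ">" ∉ v) ∨
        (∃ u v w, s = u ++ "<" :: (v ++ ">" :: "<" :: w) ∧ ">" ∉ v)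
    else ∃ u v w, s = u ++ "<" :: (v ++ ">" :: "<" :: w) ∧ ">" ∉ v := by
  intro s
  induction s with
  | nil =>
    intro b h
    have h' : (false : Bool) = true := h
    cases h'
  | cons c r ih =>
    intro b h
    cases b with
    | false =>
      have h' : (if c = "<" then dB r true else dB r false) = true := h
      by_cases hc : c = "<"
      · rw [if_pos hc] at h'
        have hres := ih true h'
        simp only [if_pos] at hres
        rcases hres with ⟨v, w, hr, hv⟩ | ⟨u, v, w, hr, hv⟩
        · exact ⟨[], v, w, by rw [hr, hc]; rfl, hv⟩
        · exact ⟨c :: u, v, w, by rw [hr]; rfl, hv⟩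
      · rw [if_neg hc] at h'
        obtain ⟨u, v, w, hr, hv⟩ := ih false h'
        exact ⟨c :: u, v, w, by rw [hr]; rfl, hv⟩
    | true =>
      simp only
      by_cases hc : c = ">"
      · subst hc
        cases r with
        | nil =>
          have h'' : (false : Bool) = true := h
          cases h''
        | cons d r2 =>
          have h'' : (if d = "<" then true else dB (d :: r2) false) = true := h
          by_cases hd : d = "<"
          · subst hd
            exact Or.inl ⟨[], r2, rfl, by simp⟩
          · rw [if_neg hd] at h''
            obtain ⟨u, v, w, hr, hv⟩ := ih false h''
            exact Or.inr ⟨">" :: u, v, w, by rw [hr]; rfl, hv⟩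
      · have h3 : dB (c :: r) true = dB r true := by
          simp only [dB, if_neg hc]
        rw [h3] at h
        have hres := ih true h
        simp only [if_pos] at hres
        rcases hres with ⟨v, w, hr, hv⟩ | ⟨u, v, w, hr, hv⟩
        · refine Or.inl ⟨c :: v, w, by rw [hr]; rfl, ?_⟩
          intro hin
          rcases List.mem_cons.mp hin with h1 | h1
          · exact hc h1.symm
          · exact hv h1
        · exact Or.inr ⟨c :: u, v, w, by rw [hr]; rfl, hv⟩

theorem dB_D (s : List String) (h : dB s false = true) : D_removeGarbage s := by
  obtain ⟨u, v, w, hs, hv⟩ := dB_decomp s false h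
  rw [hs]
  exact decomp_D u v w hv

theorem mainA : ∀ (fuel : Nat) (s pre : List String), s.length < fuel →
    okB s = true → dB s false = false →
    outerA fuel (pre ++ s) pre.length = some (pre ++ altGo s false) := by
  intro fuel
  induction fuel with
  | zero => intro s pre hf; omega
  | succ f ih =>
    intro s pre hf hok hd
    match s with
    | [] =>
      rw [outerA_done (f + 1) (pre ++ []) pre.length (by omega) (by simp)]
      simp [altGo]
    | c :: r =>
      by_cases hc : c = "<"
      · subst hc
        have hd0 : dB r true = false := by simpa [dB] using hd
        simp only [okB, Bool.and_eq_true] at hok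
        have hmem : ">" ∈ r := by
          have h1 := hok.1
          simp only [bne_self_eq_false, Bool.false_or] at h1
          exact List.contains_iff_mem.mp h1
        cases hrest0 : r.dropWhile (fun y => y ≠ ">") with
        | nil =>
          exfalso
          rw [List.dropWhile_eq_nil_iff] at hrest0
          have := hrest0 ">" hmem
          simp at this
        | cons d r' =>
        have hd' : d = ">" := pvDrop_head r d r' hrest0
        subst hd'
        have hr2 : r = (r.takeWhile (fun y => y ≠ ">")) ++ ">" :: r' := by
          conv_lhs => rw [← List.takeWhile_append_dropWhile (p := fun y : String => y ≠ ">") (l := r)]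
          rw [hrest0]
        set g := r.takeWhile (fun y : String => y ≠ ">") with hgdef
        have hgno : ">" ∉ g := by
          intro hin
          have := List.mem_takeWhile_imp hin
          simp at this
        have hlenr : r.length = g.length + 1 + r'.length := by
          conv_lhs => rw [hr2]
          simp
          omega
        have hlt : pre.length < (pre ++ "<" :: r).length := by simp
        rw [outerA, if_pos hlt]
        simp only [PySem.List.pyGet?_append_length]
        rw [if_pos trivial]
        simp only [pvPop_at]
        rw [hr2]
        rw [inner_spec g ((pre ++ (g ++ ">" :: r')).length + 1) pre r' hgno (by simp; omega)]
        simp only [PySem.List.pyGet?_append_length]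
        rw [if_pos trivial]
        simp only [pvPop_at]
        have hsl : ("<" :: r).length < f + 1 := hf
        cases r' with
        | nil =>
          rw [outerA_done f (pre ++ []) (pre.length + 1) (by simp at hsl; omega) (by simp)]
          have halt : altGo ("<" :: (g ++ [">"])) false = [] := by
            have h1 : altGo ("<" :: (g ++ [">"])) false = altGo (g ++ ">" :: []) true := by
              simp [altGo]
            rw [h1, altGo_garbage g [] hgno]
            rfl
          rw [halt]
        | cons c2 r'' =>
          have hdb : dBstop (c2 :: r'') = false := by
            rw [hr2, dB_garbage g _ hgno] at hd0
            exact hd0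
          have hc2 : c2 ≠ "<" := by
            intro h0; rw [h0] at hdb; simp [dBstop] at hdb
          have hd'' : dB r'' false = false := by
            have h1 : dB (c2 :: r'') false = false := by
              simpa [dBstop, hc2] using hdb
            simpa [dB, hc2] using h1
          have hok'' : okB r'' = true := by
            have h2 : okB (c2 :: r'') = true := by
              have h3 : r = (g ++ [">"]) ++ (c2 :: r'') := by rw [hr2]; simp
              exact okB_append _ _ (h3 ▸ hok.2)
            simp only [okB, Bool.and_eq_true] at h2
            exact h2.2
          have step : outerA f (pre ++ c2 :: r'') (pre.length + 1)
              = outerA f ((pre ++ [c2]) ++ r'') ((pre ++ [c2]).length) := by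
            simp [List.append_assoc]
          have hlen'' : r''.length < f := by
            simp at hsl hlenr
            omega
          rw [step, ih r'' (pre ++ [c2]) hlen'' hok'' hd'']
          have halt : altGo ("<" :: (g ++ ">" :: c2 :: r'')) false = c2 :: altGo r'' false := by
            have h1 : altGo ("<" :: (g ++ ">" :: c2 :: r'')) false
                = altGo (g ++ ">" :: c2 :: r'') true := by simp [altGo]
            rw [h1, altGo_garbage g (c2 :: r'') hgno]
            simp [altGo, hc2]
          rw [halt]
          simp [List.append_assoc]
      · -- ordinary character: kept by both
        simp only [okB, Bool.and_eq_true] at hok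
        have hd' : dB r false = false := by
          simpa [dB, hc] using hd
        rw [outerA]
        have hlt : pre.length < (pre ++ c :: r).length := by simp
        rw [if_pos hlt]
        simp only [PySem.List.pyGet?_append_length]
        rw [if_neg hc]
        have step : outerA f (pre ++ c :: r) (pre.length + 1)
            = outerA f ((pre ++ [c]) ++ r) ((pre ++ [c]).length) := by
          simp [List.append_assoc]
        have hlenr : r.length < f := by
          have : (c :: r).length < f + 1 := hf
          simp at this
          omega
        rw [step, ih r (pre ++ [c]) hlenr hok.2 hd']
        simp [altGo, hc, List.append_assoc]

-- ---- tightness: inside D_ the two ports always differ ----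

-- B's output never contains "<"
theorem altGo_no_open : ∀ (s : List String) (b : Bool), "<" ∉ altGo s b := by
  intro s
  induction s with
  | nil => intro b; cases b <;> simp [altGo]
  | cons c r ih =>
    intro b
    cases b with
    | true =>
      simp only [altGo]
      by_cases hc : c = ">"
      · rw [if_pos hc]; exact ih false
      · rw [if_neg hc]; exact ih true
    | false =>
      simp only [altGo]
      by_cases hc : c = "<"
      · rw [if_pos hc]; exact ih true
      · rw [if_neg hc]
        intro hmem
        rcases List.mem_cons.mp hmem with h1 | h1
        · exact hc h1.symm
        · exact ih false h1

-- a successful pop at a nonnegative index is an in-range eraseIdx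
theorem pop_some {α : Type} (xs : List α) (n : Nat) (v : α) (r : List α)
    (h : PySem.List.pop? xs ((n : Nat) : Int) = some (v, r)) :
    n < xs.length ∧ r = xs.eraseIdx n := by
  by_cases hn : n < xs.length
  · rw [PySem.List.pop?_natCast _ _ hn] at h
    injection h with h
    injection h with h1 h2
    exact ⟨hn, h2.symm⟩
  · exfalso
    unfold PySem.List.pop? at h
    cases hk : PySem.List.pyIdx? xs.length ((n : Nat) : Int) with
    | none => rw [hk] at h; cases h
    | some k =>
      unfold PySem.List.pyIdx? at hk
      rw [if_pos (Int.natCast_nonneg n)] at hk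
      rw [if_neg (by exact_mod_cast hn)] at hk
      cases hk

-- both loops only touch the list from the index on: a prefix before the index survives
theorem innerA_prefix : ∀ (fuel : Nat) (pre t : List String) (j : Nat) (out : List String),
    innerA fuel (pre ++ t) (pre.length + j) = some out → ∃ t2, out = pre ++ t2 := by
  intro fuel
  induction fuel with
  | zero => intro pre t j out h; simp [innerA] at h
  | succ f ih =>
    intro pre t j out h
    rw [innerA] at h
    cases hg : PySem.List.pyGet? (pre ++ t) ((pre.length + j : Nat) : Int) with
    | none => simp only [hg] at h; cases h
    | some c =>
      simp only [hg] at h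
      by_cases hc : c = ">"
      · rw [if_pos hc] at h
        exact ⟨t, (Option.some.inj h).symm⟩
      · rw [if_neg hc] at h
        cases hp : PySem.List.pop? (pre ++ t) ((pre.length + j : Nat) : Int) with
        | none => simp only [hp] at h; cases h
        | some vs =>
          obtain ⟨v, s'⟩ := vs
          simp only [hp] at h
          obtain ⟨hlt, hs'⟩ := pop_some _ _ _ _ hp
          rw [hs', List.eraseIdx_append_of_length_le (by omega)] at h
          exact ih pre _ j out h

theorem outerA_prefix : ∀ (fuel : Nat) (pre t : List String) (j : Nat) (out : List String),
    outerA fuel (pre ++ t) (pre.length + j) = some out → ∃ t2, out = pre ++ t2 := by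
  intro fuel
  induction fuel with
  | zero => intro pre t j out h; simp [outerA] at h
  | succ f ih =>
    intro pre t j out h
    rw [outerA] at h
    by_cases hcond : pre.length + j < (pre ++ t).length
    · rw [if_pos hcond] at h
      cases hg : PySem.List.pyGet? (pre ++ t) ((pre.length + j : Nat) : Int) with
      | none => simp only [hg] at h; cases h
      | some c =>
        simp only [hg] at h
        by_cases hc : c = "<"
        · rw [if_pos hc] at h
          cases hp : PySem.List.pop? (pre ++ t) ((pre.length + j : Nat) : Int) with
          | none => simp only [hp] at h; cases h
          | some vs =>
            obtain ⟨v, s1⟩ := vs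
            simp only [hp] at h
            obtain ⟨hlt1, hs1⟩ := pop_some _ _ _ _ hp
            rw [hs1, List.eraseIdx_append_of_length_le (by omega)] at h
            cases hi : innerA ((pre ++ t.eraseIdx (pre.length + j - pre.length)).length + 1)
                (pre ++ t.eraseIdx (pre.length + j - pre.length)) (pre.length + j) with
            | none => simp only [hi] at h; cases h
            | some s2 =>
              simp only [hi] at h
              obtain ⟨t2, ht2⟩ := innerA_prefix _ pre _ j s2 hi
              subst ht2
              cases hg2 : PySem.List.pyGet? (pre ++ t2) ((pre.length + j : Nat) : Int) with
              | none => simp only [hg2] at h; cases h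
              | some c2 =>
                simp only [hg2] at h
                by_cases hc2 : c2 = ">"
                · rw [if_pos hc2] at h
                  cases hp2 : PySem.List.pop? (pre ++ t2) ((pre.length + j : Nat) : Int) with
                  | none => simp only [hp2] at h; cases h
                  | some vs2 =>
                    obtain ⟨v2, s3⟩ := vs2
                    simp only [hp2] at h
                    obtain ⟨hlt2, hs3⟩ := pop_some _ _ _ _ hp2
                    rw [hs3, List.eraseIdx_append_of_length_le (by omega)] at h
                    exact ih pre _ (j + 1) out h
                · rw [if_neg hc2] at h
                  exact ih pre t2 (j + 1) out h
        · rw [if_neg hc] at h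
          exact ih pre t (j + 1) out h
    · rw [if_neg hcond] at h
      exact ⟨t, (Option.some.inj h).symm⟩

-- a '<'-garbage-'>'-'<' pattern anywhere in the stream makes the scanner fire, from either state
theorem dBQ : ∀ (s : List String),
    ((∃ u v w, s = u ++ "<" :: (v ++ ">" :: "<" :: w) ∧ ">" ∉ v) → dB s false = true)
    ∧ (((∃ u v w, s = u ++ "<" :: (v ++ ">" :: "<" :: w) ∧ ">" ∉ v) ∨
        (∃ v w, s = v ++ ">" :: "<" :: w ∧ ">" ∉ v)) → dB s true = true) := by
  intro s
  induction s with
  | nil =>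
    constructor
    · rintro ⟨u, v, w, hs, -⟩; cases u <;> simp at hs
    · rintro (⟨u, v, w, hs, -⟩ | ⟨v, w, hs, -⟩)
      · cases u <;> simp at hs
      · cases v <;> simp at hs
  | cons c r ih =>
    constructor
    · rintro ⟨u, v, w, hs, hv⟩
      cases u with
      | nil =>
        injection hs with hc hr
        subst hc; subst hr
        have h1 : dB ("<" :: (v ++ ">" :: "<" :: w)) false = dB (v ++ ">" :: "<" :: w) true := by
          simp [dB]
        rw [h1]
        exact ih.2 (Or.inr ⟨v, w, rfl, hv⟩)
      | cons x u' =>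
        injection hs with hc hr
        subst hc; subst hr
        simp only [List.append_eq]
        by_cases hx : c = "<"
        · have h1 : dB (c :: (u' ++ "<" :: (v ++ ">" :: "<" :: w))) false
              = dB (u' ++ "<" :: (v ++ ">" :: "<" :: w)) true := by simp [dB, hx]
          rw [h1]
          exact ih.2 (Or.inl ⟨u', v, w, rfl, hv⟩)
        · have h1 : dB (c :: (u' ++ "<" :: (v ++ ">" :: "<" :: w))) false
              = dB (u' ++ "<" :: (v ++ ">" :: "<" :: w)) false := by simp [dB, hx]
          rw [h1]
          exact ih.1 ⟨u', v, w, rfl, hv⟩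
    · rintro (⟨u, v, w, hs, hv⟩ | ⟨v, w, hs, hv⟩)
      · cases u with
        | nil =>
          injection hs with hc hr
          subst hc; subst hr
          have hne : ("<" : String) ≠ ">" := by decide
          have h1 : dB ("<" :: (v ++ ">" :: "<" :: w)) true = dB (v ++ ">" :: "<" :: w) true := by
            simp [dB, hne]
          rw [h1]
          exact ih.2 (Or.inr ⟨v, w, rfl, hv⟩)
        | cons x u' =>
          injection hs with hc hr
          subst hc; subst hr
          simp only [List.append_eq]
          by_cases hx : c = ">"
          · subst hx
            cases u' with
            | nil => simp [dB]
            | cons y u'' =>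
              simp only [List.cons_append]
              have h1 : dB (">" :: y :: (u'' ++ "<" :: (v ++ ">" :: "<" :: w))) true
                  = if y = "<" then true
                    else dB (y :: (u'' ++ "<" :: (v ++ ">" :: "<" :: w))) false := rfl
              rw [h1]
              by_cases hy : y = "<"
              · rw [if_pos hy]
              · rw [if_neg hy]
                exact ih.1 ⟨y :: u'', v, w, by simp, hv⟩
          · have h1 : dB (c :: (u' ++ "<" :: (v ++ ">" :: "<" :: w))) true
                = dB (u' ++ "<" :: (v ++ ">" :: "<" :: w)) true := by simp [dB, hx]
            rw [h1]
            exact ih.2 (Or.inl ⟨u', v, w, rfl, hv⟩)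
      · cases v with
        | nil =>
          injection hs with hc hr
          subst hc; subst hr
          simp [dB]
        | cons y v' =>
          injection hs with hc hr
          subst hc; subst hr
          simp only [List.append_eq]
          have hyne : c ≠ ">" := by
            intro h0
            apply hv
            rw [← h0]
            exact List.mem_cons_self ..
          have h1 : dB (c :: (v' ++ ">" :: "<" :: w)) true = dB (v' ++ ">" :: "<" :: w) true := by
            simp [dB, hyne]
          rw [h1]
          exact ih.2 (Or.inr ⟨v', w, rfl, fun h0 => hv (List.mem_cons_of_mem _ h0)⟩)

-- the index form of D_ yields the pattern decomposition
theorem D_to_Q (s : List String) (hD : D_removeGarbage s) :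
    ∃ u v w, s = u ++ "<" :: (v ++ ">" :: "<" :: w) ∧ ">" ∉ v := by
  obtain ⟨i, hi, j, hj, hij, hj1, hgi, hgj, hgj1, hbet⟩ := hD
  rw [List.mem_range] at hi hj
  have hgi' : s[i] = "<" := by rw [← List.getD_eq_getElem s "" hi]; exact hgi
  have hgj' : s[j]'(by omega) = ">" := by rw [← List.getD_eq_getElem s "" (by omega)]; exact hgj
  have hgj1' : s[j + 1]'(by omega) = "<" := by rw [← List.getD_eq_getElem s "" (by omega)]; exact hgj1
  refine ⟨s.take i, (s.drop (i + 1)).take (j - i - 1), s.drop (j + 2), ?_, ?_⟩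
  · have e1 : s = s.take i ++ s.drop i := (List.take_append_drop i s).symm
    have e2 : s.drop i = s[i] :: s.drop (i + 1) := List.drop_eq_getElem_cons hi
    have e3 : s.drop (i + 1) = (s.drop (i + 1)).take (j - i - 1) ++ (s.drop (i + 1)).drop (j - i - 1) :=
      (List.take_append_drop _ _).symm
    have e4 : (s.drop (i + 1)).drop (j - i - 1) = s.drop j := by
      rw [List.drop_drop]; congr 1; omega
    have e5 : s.drop j = s[j]'(by omega) :: s.drop (j + 1) := List.drop_eq_getElem_cons (by omega)
    have e6 : s.drop (j + 1) = s[j + 1]'(by omega) :: s.drop (j + 2) := List.drop_eq_getElem_cons (by omega)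
    conv_lhs => rw [e1, e2, e3, e4, e5, e6]
    rw [hgi', hgj', hgj1']
  · intro hmem
    obtain ⟨m, hm, hx⟩ := List.getElem_of_mem hmem
    rw [List.length_take] at hm
    have hm1 : m < j - i - 1 := lt_of_lt_of_le hm (min_le_left _ _)
    have hm2 : m < (s.drop (i + 1)).length := lt_of_lt_of_le hm (min_le_right _ _)
    rw [List.getElem_take, List.getElem_drop] at hx
    have hk : i + 1 + m < s.length := by rw [List.length_drop] at hm2; omega
    refine hbet (i + 1 + m) (List.mem_range.mpr (by omega)) (by omega) (by omega) ?_
    rw [List.getD_eq_getElem s "" hk]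
    exact hx

-- inside D_, A's run keeps a "<" in its output
theorem mainT : ∀ (fuel : Nat) (s pre : List String), okB s = true → dB s false = true →
    ∀ out, outerA fuel (pre ++ s) pre.length = some out → "<" ∈ out := by
  intro fuel
  induction fuel with
  | zero => intro s pre _ _ out h; simp [outerA] at h
  | succ f ih =>
    intro s pre hok hd out h
    match s with
    | [] =>
      have h0 : (false : Bool) = true := hd
      cases h0
    | c :: r =>
      by_cases hc : c = "<"
      · subst hc
        have hd0 : dB r true = true := by simpa [dB] using hd
        simp only [okB, Bool.and_eq_true] at hok
        have hmem : ">" ∈ r := by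
          have h1 := hok.1
          simp only [bne_self_eq_false, Bool.false_or] at h1
          exact List.contains_iff_mem.mp h1
        cases hrest0 : r.dropWhile (fun y => y ≠ ">") with
        | nil =>
          exfalso
          rw [List.dropWhile_eq_nil_iff] at hrest0
          have := hrest0 ">" hmem
          simp at this
        | cons d r' =>
        have hd' : d = ">" := pvDrop_head r d r' hrest0
        subst hd'
        have hr2 : r = (r.takeWhile (fun y => y ≠ ">")) ++ ">" :: r' := by
          conv_lhs => rw [← List.takeWhile_append_dropWhile (p := fun y : String => y ≠ ">") (l := r)]
          rw [hrest0]
        set g := r.takeWhile (fun y : String => y ≠ ">") with hgdef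
        have hgno : ">" ∉ g := by
          intro hin
          have := List.mem_takeWhile_imp hin
          simp at this
        have hlt : pre.length < (pre ++ "<" :: r).length := by simp
        rw [outerA, if_pos hlt] at h
        simp only [PySem.List.pyGet?_append_length] at h
        rw [if_pos trivial] at h
        simp only [pvPop_at] at h
        rw [hr2] at h
        rw [inner_spec g ((pre ++ (g ++ ">" :: r')).length + 1) pre r' hgno (by simp; omega)] at h
        simp only [PySem.List.pyGet?_append_length] at h
        rw [if_pos trivial] at h
        simp only [pvPop_at] at h
        have hds : dBstop r' = true := by
          have h1 : dB ("<" :: r) false = dB r true := by simp [dB]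
          rw [hr2, dB_garbage g _ hgno] at hd0
          exact hd0
        cases r' with
        | nil =>
          have h0 : (false : Bool) = true := hds
          cases h0
        | cons c2 r'' =>
          by_cases hc2 : c2 = "<"
          · subst hc2
            obtain ⟨t2, ht2⟩ := outerA_prefix f (pre ++ ["<"]) r'' 0 out
              (by rw [show (pre ++ ["<"]) ++ r'' = pre ++ "<" :: r'' by simp,
                show (pre ++ ["<"]).length + 0 = pre.length + 1 by simp]; exact h)
            rw [ht2]
            simp
          · have hdb1 : (if c2 = "<" then true else dB (c2 :: r'') false) = true := hds
            rw [if_neg hc2] at hdb1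
            have hd'' : dB r'' false = true := by simpa [dB, hc2] using hdb1
            have hok'' : okB r'' = true := by
              have h2 : okB (c2 :: r'') = true := by
                have h3 : r = (g ++ [">"]) ++ (c2 :: r'') := by rw [hr2]; simp
                exact okB_append _ _ (h3 ▸ hok.2)
              simp only [okB, Bool.and_eq_true] at h2
              exact h2.2
            apply ih r'' (pre ++ [c2]) hok'' hd'' out
            rw [show (pre ++ [c2]) ++ r'' = pre ++ c2 :: r'' by simp,
              show (pre ++ [c2]).length = pre.length + 1 by simp]
            exact h
      · have hd' : dB r false = true := by simpa [dB, hc] using hd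
        simp only [okB, Bool.and_eq_true] at hok
        have hlt : pre.length < (pre ++ c :: r).length := by simp
        rw [outerA, if_pos hlt] at h
        simp only [PySem.List.pyGet?_append_length] at h
        rw [if_neg hc] at h
        apply ih r (pre ++ [c]) hok.2 hd' out
        rw [show (pre ++ [c]) ++ r = pre ++ c :: r by simp,
          show (pre ++ [c]).length = pre.length + 1 by simp]
        exact h

theorem removeGarbage_eq (stream : List String)
    (hok : okB stream = true) (hd : dB stream false = false) :
    removeGarbage stream = removeGarbage_alt stream := by
  have h := mainA (stream.length + 1) stream [] (by omega) hok hd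
  simp only [List.nil_append, List.length_nil] at h
  unfold removeGarbage removeGarbage_alt
  rw [h]

-- ===== VERDICT (by name: the statement is the Claim_ definition above) =====
theorem removeGarbage_spec : Claim_unchanged_removeGarbage := by
  intro stream _ hpre hnd
  apply removeGarbage_eq stream hpre
  cases h : dB stream false with
  | false => rfl
  | true => exact absurd (dB_D stream h) hnd

theorem removeGarbage_changed : Claim_changed_removeGarbage := by
  unfold Claim_changed_removeGarbage
  decide

theorem removeGarbage_tight : Claim_exact_removeGarbage := by
  intro stream _ hpre hD heq
  have hQ := D_to_Q stream hD
  have hdb : dB stream false = true := (dBQ stream).1 hQ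
  have hmem : "<" ∈ removeGarbage stream := by
    unfold removeGarbage
    cases hout : outerA (stream.length + 1) stream 0 with
    | none =>
      obtain ⟨u, v, w, hs, -⟩ := hQ
      rw [hs]
      simp
    | some out =>
      exact mainT (stream.length + 1) stream [] hpre hdb out hout
  rw [heq] at hmem
  exact altGo_no_open stream false hmem
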